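-- pv_equiv track=rewrite | github.com/Pressio/od-rom | partition_uniform.py | _mapCellGidsToStateDofsGids
-- ===== SOURCE A (Python) =====
-- def _mapCellGidsToStateDofsGids(cellGidsDic, nx, ny, numDofsPerCell):
--   d = {}
--
--   if numDofsPerCell == 1:
--     for pCount, pCellGids in cellGidsDic.items():
--       myl = [int(i) for i in pCellGids]
--       d[pCount] = myl
--
--   elif numDofsPerCell == 2:
--     for pCount, pCellGids in cellGidsDic.items():
--       myl = [None]*len(pCellGids)*2
--       myl[0::2] = [int(i*2)   for i in pCellGids]
--       myl[1::2] = [int(i*2+1) for i in pCellGids]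
--       d[pCount] = myl
--
--   elif numDofsPerCell == 3:
--     for pCount, pCellGids in cellGidsDic.items():
--       myl = [None]*len(pCellGids)*3
--       myl[0::3] = [int(i*3)   for i in pCellGids]
--       myl[1::3] = [int(i*3+1) for i in pCellGids]
--       myl[2::3] = [int(i*3+2) for i in pCellGids]
--       d[pCount] = myl
--
--   elif numDofsPerCell == 4:
--     for pCount, pCellGids in cellGidsDic.items():
--       myl = [None]*len(pCellGids)*4
--       myl[0::4] = [int(i*4)   for i in pCellGids]
--       myl[1::4] = [int(i*4+1) for i in pCellGids]
--       myl[2::4] = [int(i*4+2) for i in pCellGids]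
--       myl[3::4] = [int(i*4+3) for i in pCellGids]
--       d[pCount] = myl
--
--   elif numDofsPerCell == 5:
--     for pCount, pCellGids in cellGidsDic.items():
--       myl = [None]*len(pCellGids)*5
--       myl[0::5] = [int(i*5)   for i in pCellGids]
--       myl[1::5] = [int(i*5+1) for i in pCellGids]
--       myl[2::5] = [int(i*5+2) for i in pCellGids]
--       myl[3::5] = [int(i*5+3) for i in pCellGids]
--       myl[4::5] = [int(i*5+4) for i in pCellGids]
--       d[pCount] = myl
--
--   return d
-- ===== SOURCE B (Python) =====
-- def _mapCellGidsToStateDofsGids(cellGidsDic, nx, ny, numDofsPerCell):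
--   if numDofsPerCell not in (1, 2, 3, 4, 5):
--     return {}
--   return {pCount: [int(i*numDofsPerCell + k) for i in pCellGids
--                    for k in range(numDofsPerCell)]
--           for pCount, pCellGids in cellGidsDic.items()}
-- ===== Notes on version B (the rewrite author's own statement) =====
-- stated objective: simpler
-- what changed: Replaces the five duplicated per-dof branches with strided slice assignments by one guard plus a single dict comprehension whose nested comprehension emits each cell's consecutive DOFs in order.
import Mathlib
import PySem

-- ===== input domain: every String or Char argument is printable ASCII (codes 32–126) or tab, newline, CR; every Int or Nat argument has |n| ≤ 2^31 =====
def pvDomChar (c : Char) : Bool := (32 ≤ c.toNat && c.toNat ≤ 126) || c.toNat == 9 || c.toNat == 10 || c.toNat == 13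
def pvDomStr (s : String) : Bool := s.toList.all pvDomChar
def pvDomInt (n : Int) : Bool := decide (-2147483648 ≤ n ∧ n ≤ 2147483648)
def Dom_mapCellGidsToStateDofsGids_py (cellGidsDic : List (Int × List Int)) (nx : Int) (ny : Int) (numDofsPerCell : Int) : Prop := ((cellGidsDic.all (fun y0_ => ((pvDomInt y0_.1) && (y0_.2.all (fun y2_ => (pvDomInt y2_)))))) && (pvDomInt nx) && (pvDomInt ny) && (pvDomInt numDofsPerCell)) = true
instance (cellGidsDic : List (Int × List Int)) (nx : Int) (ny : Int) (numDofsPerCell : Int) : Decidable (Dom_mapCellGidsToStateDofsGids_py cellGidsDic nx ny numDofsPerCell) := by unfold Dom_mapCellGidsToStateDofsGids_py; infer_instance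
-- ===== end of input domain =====

-- B replaces A's five duplicated per-dof branches (strided slice fills) with one guard
-- plus a single nested comprehension emitting each cell's consecutive DOFs; objective: simpler.


-- ===== PORT A =====
-- Model of the strided slice fills: `myl[o::k] = [f_o(i) for i in gids]` for o = 0..k-1
-- leaves the list whose block j (one per gid) reads the j-th element of each offset list in turn.
def pvStrided (n : Nat) (ls : List (List Int)) : List Int :=
  (List.range n).flatMap (fun j => ls.map (fun l => l.getD j 0))

def mapCellGidsToStateDofsGids_py (cellGidsDic : List (Int × List Int)) (nx : Int) (ny : Int) (numDofsPerCell : Int) : List (Int × List Int) :=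
  (if numDofsPerCell = 1 then
      cellGidsDic.foldl (fun d pr => d.insert pr.1 (pr.2.map (fun i => i))) (PySem.Dict.empty : PySem.Dict Int (List Int))
    else if numDofsPerCell = 2 then
      cellGidsDic.foldl (fun d pr => d.insert pr.1
        (pvStrided pr.2.length [pr.2.map (fun i => i*2), pr.2.map (fun i => i*2+1)])) PySem.Dict.empty
    else if numDofsPerCell = 3 then
      cellGidsDic.foldl (fun d pr => d.insert pr.1
        (pvStrided pr.2.length [pr.2.map (fun i => i*3), pr.2.map (fun i => i*3+1), pr.2.map (fun i => i*3+2)])) PySem.Dict.empty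
    else if numDofsPerCell = 4 then
      cellGidsDic.foldl (fun d pr => d.insert pr.1
        (pvStrided pr.2.length [pr.2.map (fun i => i*4), pr.2.map (fun i => i*4+1), pr.2.map (fun i => i*4+2), pr.2.map (fun i => i*4+3)])) PySem.Dict.empty
    else if numDofsPerCell = 5 then
      cellGidsDic.foldl (fun d pr => d.insert pr.1
        (pvStrided pr.2.length [pr.2.map (fun i => i*5), pr.2.map (fun i => i*5+1), pr.2.map (fun i => i*5+2), pr.2.map (fun i => i*5+3), pr.2.map (fun i => i*5+4)])) PySem.Dict.empty
    else PySem.Dict.empty).items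

-- ===== PORT B =====
def mapCellGidsToStateDofsGids_py_alt (cellGidsDic : List (Int × List Int)) (nx : Int) (ny : Int) (numDofsPerCell : Int) : List (Int × List Int) :=
  if numDofsPerCell = 1 ∨ numDofsPerCell = 2 ∨ numDofsPerCell = 3 ∨ numDofsPerCell = 4 ∨ numDofsPerCell = 5 then
    (cellGidsDic.foldl (fun d pr => d.insert pr.1
        (pr.2.flatMap (fun i => (List.range numDofsPerCell.toNat).map (fun k : Nat => i*numDofsPerCell + (k : Int)))))
      (PySem.Dict.empty : PySem.Dict Int (List Int))).items
  else []

-- ===== PRECONDITION & SPEC =====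
def Spec_mapCellGidsToStateDofsGids_py (cellGidsDic : List (Int × List Int)) (nx : Int) (ny : Int) (numDofsPerCell : Int) (out : List (Int × List Int)) : Prop := out = mapCellGidsToStateDofsGids_py_alt cellGidsDic nx ny numDofsPerCell
instance (cellGidsDic : List (Int × List Int)) (nx : Int) (ny : Int) (numDofsPerCell : Int) (out : List (Int × List Int)) : Decidable (Spec_mapCellGidsToStateDofsGids_py cellGidsDic nx ny numDofsPerCell out) := by unfold Spec_mapCellGidsToStateDofsGids_py; infer_instance

-- ===== CLAIM (what is proved, stated in full; the proofs are below) =====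
def Claim_equal_mapCellGidsToStateDofsGids_py : Prop := ∀ (cellGidsDic : List (Int × List Int)) (nx : Int) (ny : Int) (numDofsPerCell : Int), Dom_mapCellGidsToStateDofsGids_py cellGidsDic nx ny numDofsPerCell → Spec_mapCellGidsToStateDofsGids_py cellGidsDic nx ny numDofsPerCell (mapCellGidsToStateDofsGids_py cellGidsDic nx ny numDofsPerCell)

-- ===== LEMMAS AND PROOFS =====

lemma pvStrided_succ (n : Nat) (ls : List (List Int)) :
    pvStrided (n + 1) ls = ls.map (fun l => l.getD 0 0) ++ pvStrided n (ls.map List.tail) := by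
  simp only [pvStrided, List.range_succ_eq_map, List.flatMap_cons, List.flatMap_map]
  congr 1
  apply List.flatMap_congr
  intro j _
  simp only [List.map_map]
  apply List.map_congr_left
  intro l _
  cases l <;> rfl

lemma pvStrided_map (fs : List (Int → Int)) (g : List Int) :
    pvStrided g.length (fs.map (fun f => g.map f)) = g.flatMap (fun i => fs.map (fun f => f i)) := by
  induction g with
  | nil => simp [pvStrided]
  | cons a t ih =>
    rw [List.length_cons, pvStrided_succ]
    have h1 : (fs.map (fun f => List.map f (a :: t))).map (fun l => l.getD 0 0)
        = fs.map (fun f => f a) := by simp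
    have h2 : (fs.map (fun f => List.map f (a :: t))).map List.tail
        = fs.map (fun f => List.map f t) := by simp
    rw [h1, h2, ih, List.flatMap_cons]

lemma pvVal2 (g : List Int) :
    pvStrided g.length [g.map (fun i => i*2), g.map (fun i => i*2+1)]
      = g.flatMap (fun i => (List.range (Int.toNat 2)).map (fun k : Nat => i*2 + (k : Int))) := by
  have h := pvStrided_map [fun i : Int => i*2, fun i => i*2+1] g
  simp only [List.map_cons, List.map_nil] at h
  rw [h, show Int.toNat 2 = 2 from rfl, show List.range 2 = [0, 1] from by decide]
  simp

lemma pvVal3 (g : List Int) :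
    pvStrided g.length [g.map (fun i => i*3), g.map (fun i => i*3+1), g.map (fun i => i*3+2)]
      = g.flatMap (fun i => (List.range (Int.toNat 3)).map (fun k : Nat => i*3 + (k : Int))) := by
  have h := pvStrided_map [fun i : Int => i*3, fun i => i*3+1, fun i => i*3+2] g
  simp only [List.map_cons, List.map_nil] at h
  rw [h, show Int.toNat 3 = 3 from rfl, show List.range 3 = [0, 1, 2] from by decide]
  simp

lemma pvVal4 (g : List Int) :
    pvStrided g.length [g.map (fun i => i*4), g.map (fun i => i*4+1), g.map (fun i => i*4+2), g.map (fun i => i*4+3)]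
      = g.flatMap (fun i => (List.range (Int.toNat 4)).map (fun k : Nat => i*4 + (k : Int))) := by
  have h := pvStrided_map [fun i : Int => i*4, fun i => i*4+1, fun i => i*4+2, fun i => i*4+3] g
  simp only [List.map_cons, List.map_nil] at h
  rw [h, show Int.toNat 4 = 4 from rfl, show List.range 4 = [0, 1, 2, 3] from by decide]
  simp

lemma pvVal5 (g : List Int) :
    pvStrided g.length [g.map (fun i => i*5), g.map (fun i => i*5+1), g.map (fun i => i*5+2), g.map (fun i => i*5+3), g.map (fun i => i*5+4)]
      = g.flatMap (fun i => (List.range (Int.toNat 5)).map (fun k : Nat => i*5 + (k : Int))) := by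
  have h := pvStrided_map [fun i : Int => i*5, fun i => i*5+1, fun i => i*5+2, fun i => i*5+3, fun i => i*5+4] g
  simp only [List.map_cons, List.map_nil] at h
  rw [h, show Int.toNat 5 = 5 from rfl, show List.range 5 = [0, 1, 2, 3, 4] from by decide]
  simp

lemma mapCellGidsToStateDofsGids_eq (cellGidsDic : List (Int × List Int)) (nx ny nd : Int) :
    mapCellGidsToStateDofsGids_py cellGidsDic nx ny nd
      = mapCellGidsToStateDofsGids_py_alt cellGidsDic nx ny nd := by
  unfold mapCellGidsToStateDofsGids_py mapCellGidsToStateDofsGids_py_alt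
  by_cases h1 : nd = 1
  · subst h1
    norm_num
  by_cases h2 : nd = 2
  · subst h2
    norm_num
    congr 2
    funext d pr
    rw [pvVal2 pr.2]
  by_cases h3 : nd = 3
  · subst h3
    norm_num
    congr 2
    funext d pr
    rw [pvVal3 pr.2]
  by_cases h4 : nd = 4
  · subst h4
    norm_num
    congr 2
    funext d pr
    rw [pvVal4 pr.2]
  by_cases h5 : nd = 5
  · subst h5
    norm_num
    congr 2
    funext d pr
    rw [pvVal5 pr.2]
  · simp only [if_neg h1, if_neg h2, if_neg h3, if_neg h4, if_neg h5,
      if_neg (show ¬(nd = 1 ∨ nd = 2 ∨ nd = 3 ∨ nd = 4 ∨ nd = 5) from by tauto)]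
    rfl

-- ===== VERDICT (by name: the statement is the Claim_ definition above) =====
theorem mapCellGidsToStateDofsGids_py_spec : Claim_equal_mapCellGidsToStateDofsGids_py := by
  intro dic nx ny nd _
  unfold Spec_mapCellGidsToStateDofsGids_py
  exact mapCellGidsToStateDofsGids_eq dic nx ny nd
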